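-- pv_equiv track=rewrite | github.com/SoftwareQuTech/QLinkLayerSimulations | simulations/create_measure_simulation/readonly/create_simdetails_and_paramcombinations.py | get_paramcombinations
-- ===== SOURCE A (Python) =====
-- import itertools
--
-- def get_paramcombinations(opt_params):
--     # make all parameters that were not a list (i.e. they consist
--     # of a single element only, into a list
--     allparams = []
--     for value in list(opt_params.values()):
--         if isinstance(value, list):
--             allparams.append(value)
--         else:
--             allparams.append([value])
--
--     # create a dictionary `paramcombinations` with keys integers
--     # and as values all possible combinations of the parameters
--     # (that is, `paramcombinations` is like the cartesian product
--     # of all parameter choices).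
--     # First try if user already defined this dictionary
--     paramcombinations = {}
--     counter = 0
--     for parametertuple in itertools.product(*allparams):
--         pardict = {}
--         for keyindex, key in enumerate(list(opt_params.keys())):
--             pardict[key] = parametertuple[keyindex]
--         paramcombinations[counter] = pardict
--         counter += 1
--
--     return paramcombinations
-- ===== SOURCE B (Python) =====
-- def get_paramcombinations(opt_params):
--     # Build the cartesian product iteratively: extend partial assignments
--     # one parameter at a time (last parameter varies fastest, like itertools.product).
--     working = [{}]
--     for key, values in opt_params.items():
--         if not isinstance(values, list):
--             values = [values]
--         working = [{**partial, key: v} for partial in working for v in values]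
--     return {i: combo for i, combo in enumerate(working)}
-- ===== Notes on version B (the rewrite author's own statement) =====
-- stated objective: alternative
-- what changed: B replaces itertools.product plus per-tuple re-assembly (enumerate keys, index into the tuple) by an iterative build that extends partial dicts one parameter at a time and enumerates the result; no tuple stage or indexing remains.
import Mathlib
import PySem

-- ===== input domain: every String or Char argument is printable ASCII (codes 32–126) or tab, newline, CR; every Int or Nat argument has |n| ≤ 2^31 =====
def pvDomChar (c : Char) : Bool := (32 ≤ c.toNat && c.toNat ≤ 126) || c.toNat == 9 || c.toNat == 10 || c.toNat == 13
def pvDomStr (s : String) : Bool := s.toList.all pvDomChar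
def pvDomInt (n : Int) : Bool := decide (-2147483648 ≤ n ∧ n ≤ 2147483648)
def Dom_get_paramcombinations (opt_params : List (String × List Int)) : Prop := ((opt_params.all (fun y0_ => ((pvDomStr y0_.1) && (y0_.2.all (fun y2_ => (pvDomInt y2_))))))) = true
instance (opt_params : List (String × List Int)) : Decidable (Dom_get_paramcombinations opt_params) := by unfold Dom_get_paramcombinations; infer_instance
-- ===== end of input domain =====

-- B builds the cartesian product by extending partial dicts one parameter at a time
-- instead of itertools.product + re-indexing tuples by enumerated keys (objective: alternative).

-- ===== PORT A =====
-- itertools.product over the value lists (last list varies fastest)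
def pyProduct : List (List Int) → List (List Int)
  | [] => [[]]
  | l :: ls => l.flatMap (fun v => (pyProduct ls).map (fun t => v :: t))

-- under the type convention every value is a list, so isinstance(value, list) is always true;
-- pardict[key] = parametertuple[keyindex]: the index is always in range (tuples have one entry
-- per key), so Python never raises and `.getD 0` is never reached with a default
def get_paramcombinations (opt_params : List (String × List Int)) : List (Int × List (String × Int)) :=
  (((pyProduct (opt_params.foldl (fun acc kv => acc ++ [kv.2]) [])).foldl
      (fun st t =>
        (st.1.insert st.2
          ((PySem.List.enumerate (opt_params.map Prod.fst) 0).foldl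
            (fun pd ik => pd.insert ik.2 ((PySem.List.pyGet? t ik.1).getD 0))
            PySem.Dict.empty),
         st.2 + 1))
      ((PySem.Dict.empty : PySem.Dict Int (PySem.Dict String Int)), 0)).1).items.map
    (fun p => (p.1, p.2.items))

-- ===== PORT B =====
def get_paramcombinations_alt (opt_params : List (String × List Int)) : List (Int × List (String × Int)) :=
  (PySem.List.enumerate
      (opt_params.foldl
        (fun ws kv => ws.flatMap (fun p => kv.2.map (fun v => p.insert kv.1 v)))
        [(PySem.Dict.empty : PySem.Dict String Int)])
      0).map
    (fun p => (p.1, p.2.items))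

-- ===== PRECONDITION & SPEC =====
def Spec_get_paramcombinations (opt_params : List (String × List Int)) (out : List (Int × List (String × Int))) : Prop := out = get_paramcombinations_alt opt_params
instance (opt_params : List (String × List Int)) (out : List (Int × List (String × Int))) : Decidable (Spec_get_paramcombinations opt_params out) := by unfold Spec_get_paramcombinations; infer_instance

-- ===== CLAIM (what is proved, stated in full; the proofs are below) =====
def Claim_equal_get_paramcombinations : Prop := ∀ (opt_params : List (String × List Int)), Dom_get_paramcombinations opt_params → Spec_get_paramcombinations opt_params (get_paramcombinations opt_params)

-- ===== LEMMAS AND PROOFS =====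

-- collecting the values with `acc ++ [v]` is just map Prod.snd
theorem allparams_eq (ps : List (String × List Int)) :
    ps.foldl (fun acc kv => acc ++ [kv.2]) [] = ps.map Prod.snd := by
  induction ps using List.reverseRecOn with
  | nil => rfl
  | append_singleton ps p ih => simp [ih]

-- every tuple of the product has one entry per value list
theorem pyProduct_length {ls : List (List Int)} {t : List Int} (h : t ∈ pyProduct ls) :
    t.length = ls.length := by
  induction ls generalizing t with
  | nil => simp [pyProduct] at h; simp [h]
  | cons l ls ih =>
    simp only [pyProduct, List.mem_flatMap, List.mem_map] at h
    obtain ⟨v, _, t', ht', rfl⟩ := h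
    simp [ih ht']

-- A's inner loop (enumerate keys + tuple indexing) = fold over zip keys tuple
theorem enum_fold_eq_zip_fold (ks : List String) (ts u : List Int)
    (pd : PySem.Dict String Int) (h : ks.length = ts.length) :
    (PySem.List.enumerate ks (u.length)).foldl
      (fun pd ik => pd.insert ik.2 ((PySem.List.pyGet? (u ++ ts) ik.1).getD 0)) pd
    = (ks.zip ts).foldl (fun pd kv => pd.insert kv.1 kv.2) pd := by
  induction ks generalizing ts u pd with
  | nil => simp [PySem.List.enumerate_nil]
  | cons k ks ih =>
    cases ts with
    | nil => simp at h
    | cons v ts =>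
      rw [PySem.List.enumerate_cons]
      simp only [List.foldl_cons, PySem.List.pyGet?_append_length, Option.getD_some,
        List.zip_cons_cons]
      have hlen : ((u.length : Int) + 1) = ((u ++ [v]).length : Int) := by simp
      have happ : u ++ v :: ts = (u ++ [v]) ++ ts := by simp
      rw [hlen, happ, ih ts (u ++ [v]) (pd.insert k v) (by simpa using h)]

-- B's loop = map over the product, inserting along zip keys tuple
theorem build_eq_product (ps : List (String × List Int))
    (ws : List (PySem.Dict String Int)) :
    ps.foldl (fun ws kv => ws.flatMap (fun p => kv.2.map (fun v => p.insert kv.1 v))) ws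
    = ws.flatMap (fun p => (pyProduct (ps.map Prod.snd)).map
        (fun t => ((ps.map Prod.fst).zip t).foldl (fun pd kv => pd.insert kv.1 kv.2) p)) := by
  induction ps generalizing ws with
  | nil => simp [pyProduct]
  | cons kv ps ih =>
    simp only [List.foldl_cons, List.map_cons, pyProduct]
    rw [ih]
    rw [List.flatMap_assoc]
    apply List.flatMap_congr
    intro p _
    rw [List.flatMap_map, List.map_flatMap]
    apply List.flatMap_congr
    intro v _
    rw [List.map_map]
    apply List.map_congr_left
    intro t _
    simp [List.zip_cons_cons]

-- A's outer loop appends fresh integer keys, producing exactly enumerate from c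
theorem counter_fold_items (f : List Int → PySem.Dict String Int)
    (ts : List (List Int)) (d : PySem.Dict Int (PySem.Dict String Int)) (c : Int)
    (hd : ∀ k ∈ d.keys, k < c) :
    ((ts.foldl (fun st t => (st.1.insert st.2 (f t), st.2 + 1)) (d, c)).1).items
    = d.items ++ PySem.List.enumerate (ts.map f) c := by
  induction ts generalizing d c with
  | nil => simp [PySem.List.enumerate_nil]
  | cons t ts ih =>
    have hnc : d.contains c = false := by
      cases h : d.contains c
      · rfl
      · exact absurd (hd c ((PySem.Dict.contains_iff_mem_keys d c).mp h)) (lt_irrefl c)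
    simp only [List.foldl_cons]
    rw [ih (d.insert c (f t)) (c + 1)
      (by
        intro k hk
        rw [PySem.Dict.keys_insert_of_not_contains _ _ hnc] at hk
        rcases List.mem_append.mp hk with h | h
        · have := hd k h; omega
        · simp at h; omega)]
    rw [PySem.Dict.items_insert_of_not_contains _ _ hnc]
    rw [List.map_cons, PySem.List.enumerate_cons]
    simp

-- ===== VERDICT (by name: the statement is the Claim_ definition above) =====
theorem get_paramcombinations_spec : Claim_equal_get_paramcombinations := by
  intro ps _
  show get_paramcombinations ps = get_paramcombinations_alt ps
  unfold get_paramcombinations get_paramcombinations_alt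
  rw [allparams_eq, counter_fold_items _ _ _ _ (by simp [PySem.Dict.keys_empty]),
      build_eq_product]
  simp only [PySem.Dict.empty, List.nil_append, List.flatMap_cons,
    List.flatMap_nil, List.append_nil]
  congr 2
  apply List.map_congr_left
  intro t ht
  have hlen : (ps.map Prod.fst).length = t.length := by
    simp [pyProduct_length ht]
  simpa using enum_fold_eq_zip_fold (ps.map Prod.fst) t [] PySem.Dict.empty hlen
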